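-- pv_equiv track=rewrite | github.com/Leapense/problems | 14098번: Tunel/test.py | analyze_overtakes
-- ===== SOURCE A (Python) =====
-- def analyze_overtakes(entrance_list: list[str], exit_list: list[str]) -> int:
--     """
--     The core logic of the Tunel problem solution, refactored for analysis.
--     This function has an O(N^2) time complexity and O(N) space complexity.
--     """
--     n = len(entrance_list)
--     if n == 0:
--         return 0
--
--     # O(N) space and O(N) time to build the map
--     entrance_positions = {plate: i for i, plate in enumerate(entrance_list)}
--
--     # O(N) space for the set in the worst case
--     violators = set()
--
--     # O(N^2) time for the nested loops
--     for i in range(n):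
--         for j in range(i + 1, n):
--             car_that_exited_earlier = exit_list[i]
--             car_that_exited_later = exit_list[j]
--
--             # If the car that exited earlier entered LATER, it must have overtaken.
--             if entrance_positions[car_that_exited_earlier] > entrance_positions[car_that_exited_later]:
--                 violators.add(car_that_exited_earlier)
--
--     return len(violators)
-- ===== SOURCE B (Python) =====
-- def analyze_overtakes(entrance_list: list[str], exit_list: list[str]) -> int:
--     """
--     Single right-to-left pass: the car exiting at position i overtook someone
--     iff its entrance position exceeds the minimum entrance position among cars
--     exiting after it.  O(N) time instead of A's O(N^2) nested loops.
--     """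
--     n = len(entrance_list)
--     if n < 2:
--         return 0
--     pos = {plate: i for i, plate in enumerate(entrance_list)}
--     violators = set()
--     min_pos = pos[exit_list[n - 1]]
--     for i in range(n - 2, -1, -1):
--         p = pos[exit_list[i]]
--         if p > min_pos:
--             violators.add(exit_list[i])
--         elif p < min_pos:
--             min_pos = p
--     return len(violators)
-- ===== Notes on version B (the rewrite author's own statement) =====
-- stated objective: faster
-- what changed: Replaced A's quadratic nested scan over all exit-order pairs by a single right-to-left pass that maintains the running minimum entrance position of the cars already seen (a car overtook iff its entrance position exceeds that suffix minimum).
import Mathlib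
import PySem

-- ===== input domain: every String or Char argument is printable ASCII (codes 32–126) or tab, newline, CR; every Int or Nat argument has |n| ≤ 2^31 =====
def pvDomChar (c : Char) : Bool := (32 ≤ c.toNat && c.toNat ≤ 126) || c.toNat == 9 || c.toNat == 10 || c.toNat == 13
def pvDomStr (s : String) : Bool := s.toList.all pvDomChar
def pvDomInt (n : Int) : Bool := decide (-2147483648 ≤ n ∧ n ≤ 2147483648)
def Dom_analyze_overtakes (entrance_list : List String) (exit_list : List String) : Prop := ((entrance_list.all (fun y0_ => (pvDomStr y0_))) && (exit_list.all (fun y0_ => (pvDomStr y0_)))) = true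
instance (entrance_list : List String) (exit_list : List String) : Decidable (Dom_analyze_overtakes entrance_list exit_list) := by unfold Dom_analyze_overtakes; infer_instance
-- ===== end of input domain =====

-- B replaces A's O(N^2) nested pair scan by one right-to-left pass keeping a running
-- suffix minimum of entrance positions (objective: faster, asymptotic O(N) vs O(N^2)).

-- ===== PORT A =====
-- shared helper: the dict comprehension {plate: i for i, plate in enumerate(entrance_list)}
-- (identical line in both Pythons)
def pvPosDict (entrance_list : List String) : PySem.Dict String Int :=
  (PySem.List.enumerate entrance_list 0).foldl (fun d p => d.insert p.2 p.1) PySem.Dict.empty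

-- literal transliteration of A; exit_list[i] and the dict lookup are total forms
-- (pyGetD/getD), exact under Pre_ (where Python does not raise)
def analyze_overtakes (entrance_list : List String) (exit_list : List String) : Int :=
  let n : Int := entrance_list.length
  if n = 0 then 0
  else
    let entrance_positions := pvPosDict entrance_list
    let violators : PySem.Set String :=
      (PySem.List.pyRange 0 n 1).foldl (fun vs i =>
        (PySem.List.pyRange (i + 1) n 1).foldl (fun vs j =>
          let car_that_exited_earlier := PySem.List.pyGetD exit_list i ""
          let car_that_exited_later := PySem.List.pyGetD exit_list j ""
          if entrance_positions.getD car_that_exited_later 0 <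
              entrance_positions.getD car_that_exited_earlier 0 then
            PySem.Set.add vs car_that_exited_earlier
          else vs) vs)
        PySem.Set.empty
    PySem.Set.len violators

-- ===== PORT B =====
-- literal transliteration of Source B: one countdown loop, state = (min_pos, violators)
def analyze_overtakes_alt (entrance_list : List String) (exit_list : List String) : Int :=
  let n : Int := entrance_list.length
  if n < 2 then 0
  else
    let pos := pvPosDict entrance_list
    let st :=
      (PySem.List.pyRange (n - 2) (-1) (-1)).foldl (fun st i =>
        let p := pos.getD (PySem.List.pyGetD exit_list i "") 0
        if st.1 < p then (st.1, PySem.Set.add st.2 (PySem.List.pyGetD exit_list i ""))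
        else if p < st.1 then (p, st.2)
        else st)
        (pos.getD (PySem.List.pyGetD exit_list (n - 1) "") 0, PySem.Set.empty)
    PySem.Set.len st.2

-- ===== PRECONDITION & SPEC =====
-- Pre_: exactly where Python A returns (no IndexError/KeyError): either fewer than two
-- cars, or exit_list covers the first n entries and each of them is an entrance plate.
def Pre_analyze_overtakes (entrance_list : List String) (exit_list : List String) : Prop :=
  entrance_list.length ≤ 1 ∨
  (entrance_list.length ≤ exit_list.length ∧
    ∀ s ∈ exit_list.take entrance_list.length, s ∈ entrance_list)
instance (entrance_list : List String) (exit_list : List String) : Decidable (Pre_analyze_overtakes entrance_list exit_list) := by unfold Pre_analyze_overtakes; infer_instance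

def pvWitness_analyze_overtakes : List String × List String := (["a", "b", "c"], ["b", "a", "c"])

def Spec_analyze_overtakes (entrance_list : List String) (exit_list : List String) (out : Int) : Prop := out = analyze_overtakes_alt entrance_list exit_list
instance (entrance_list : List String) (exit_list : List String) (out : Int) : Decidable (Spec_analyze_overtakes entrance_list exit_list out) := by unfold Spec_analyze_overtakes; infer_instance

-- ===== CLAIM (what is proved, stated in full; the proofs are below) =====
def Claim_equal_analyze_overtakes : Prop := ∀ (entrance_list : List String) (exit_list : List String), Dom_analyze_overtakes entrance_list exit_list → Pre_analyze_overtakes entrance_list exit_list → Spec_analyze_overtakes entrance_list exit_list (analyze_overtakes entrance_list exit_list)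

-- ===== LEMMAS AND PROOFS =====

-- membership in A's inner loop (conditionally adds the constant c)
theorem pv_mem_foldl_add_if {l : List Int} {p : Int → Prop} [DecidablePred p]
    {c y : String} {s : PySem.Set String} :
    y ∈ l.foldl (fun vs j => if p j then PySem.Set.add vs c else vs) s ↔
      y ∈ s ∨ ((∃ j ∈ l, p j) ∧ y = c) := by
  induction l generalizing s with
  | nil => simp
  | cons a t ih =>
    simp only [List.foldl_cons]
    by_cases h : p a
    · rw [if_pos h, ih]
      simp only [PySem.Set.mem_add, List.mem_cons]
      constructor
      · rintro ((hy | hy) | hy)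
        · exact Or.inl hy
        · exact Or.inr ⟨⟨a, Or.inl rfl, h⟩, hy⟩
        · exact Or.inr ⟨⟨hy.1.choose, Or.inr hy.1.choose_spec.1, hy.1.choose_spec.2⟩, hy.2⟩
      · rintro (hy | ⟨⟨j, (rfl | hj), hp⟩, hy⟩)
        · exact Or.inl (Or.inl hy)
        · exact Or.inl (Or.inr hy)
        · exact Or.inr ⟨⟨j, hj, hp⟩, hy⟩
    · rw [if_neg h, ih]
      simp only [List.mem_cons]
      constructor
      · rintro (hy | hy)
        · exact Or.inl hy
        · exact Or.inr ⟨⟨hy.1.choose, Or.inr hy.1.choose_spec.1, hy.1.choose_spec.2⟩, hy.2⟩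
      · rintro (hy | ⟨⟨j, (rfl | hj), hp⟩, hy⟩)
        · exact Or.inl hy
        · exact absurd hp h
        · exact Or.inr ⟨⟨j, hj, hp⟩, hy⟩

-- a fold whose step preserves Nodup preserves Nodup
theorem pv_nodup_foldl {β : Type} (g : PySem.Set String → β → PySem.Set String)
    (hg : ∀ s b, s.Nodup → (g s b).Nodup) :
    ∀ (l : List β) (s : PySem.Set String), s.Nodup → (l.foldl g s).Nodup := by
  intro l
  induction l with
  | nil => intro s hs; simpa using hs
  | cons a t ih => intro s hs; exact ih _ (hg s a hs)

-- membership in A's double loop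
theorem pv_mem_foldl_outer {l : List Int} {g : Int → List Int} {p : Int → Int → Prop}
    [∀ i j, Decidable (p i j)] {e : Int → String} {y : String} {s : PySem.Set String} :
    y ∈ l.foldl (fun vs i =>
        (g i).foldl (fun vs j => if p i j then PySem.Set.add vs (e i) else vs) vs) s ↔
      y ∈ s ∨ ∃ i ∈ l, (∃ j ∈ g i, p i j) ∧ y = e i := by
  induction l generalizing s with
  | nil => simp
  | cons a t ih =>
    simp only [List.foldl_cons]
    rw [ih, pv_mem_foldl_add_if]
    simp only [List.mem_cons]
    constructor
    · rintro ((h | ⟨hw, hy⟩) | ⟨i, hi, hw, hy⟩)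
      · exact Or.inl h
      · exact Or.inr ⟨a, Or.inl rfl, hw, hy⟩
      · exact Or.inr ⟨i, Or.inr hi, hw, hy⟩
    · rintro (h | ⟨i, (rfl | hi), hw, hy⟩)
      · exact Or.inl (Or.inl h)
      · exact Or.inl (Or.inr ⟨hw, hy⟩)
      · exact Or.inr ⟨i, hi, hw, hy⟩

-- characterisation of B's countdown fold: with (m, vs) such that m is the minimum of
-- f over (a, n), the final set holds exactly the e i with a descent witness to its right
theorem pv_B_fold_char (n : Int) (f : Int → Int) (e : Int → String) :
    ∀ (N : Nat) (a : Int), (a + 1).toNat = N → ∀ (m : Int) (vs : PySem.Set String),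
    a < n - 1 →
    (∀ k, a < k → k < n → m ≤ f k) →
    (∃ k, a < k ∧ k < n ∧ m = f k) →
    ∀ y,
      y ∈ ((PySem.List.pyRange a (-1) (-1)).foldl (fun st i =>
          if st.1 < f i then (st.1, PySem.Set.add st.2 (e i))
          else if f i < st.1 then (f i, st.2)
          else st) (m, vs)).2 ↔
        y ∈ vs ∨ ∃ i, 0 ≤ i ∧ i ≤ a ∧ (∃ j, i < j ∧ j < n ∧ f j < f i) ∧ y = e i := by
  intro N
  induction N with
  | zero =>
    intro a ha m vs _ _ _ y
    have ha' : a ≤ -1 := by omega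
    rw [PySem.List.pyRange_neg_one_eq_nil ha']
    simp only [List.foldl_nil]
    constructor
    · exact Or.inl
    · rintro (h | ⟨i, h0, h1, _, _⟩)
      · exact h
      · omega
  | succ N ih =>
    intro a ha m vs han hlb ⟨k0, hk0a, hk0n, hk0⟩ y
    have ha0 : 0 ≤ a := by omega
    rw [PySem.List.pyRange_neg_one_cons (by omega : (-1 : Int) < a)]
    simp only [List.foldl_cons]
    by_cases h1 : m < f a
    · rw [if_pos h1]
      rw [ih (a - 1) (by omega) m (PySem.Set.add vs (e a)) (by omega)
          (by intro k hk hkn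
              by_cases hka : k = a
              · subst hka; exact le_of_lt h1
              · exact hlb k (by omega) hkn)
          ⟨k0, by omega, hk0n, hk0⟩ y]
      rw [PySem.Set.mem_add]
      constructor
      · rintro ((h | h) | ⟨i, hi0, hia, hw, hy⟩)
        · exact Or.inl h
        · exact Or.inr ⟨a, ha0, le_refl a, ⟨k0, hk0a, hk0n, by omega⟩, h⟩
        · exact Or.inr ⟨i, hi0, by omega, hw, hy⟩
      · rintro (h | ⟨i, hi0, hia, hw, hy⟩)
        · exact Or.inl (Or.inl h)
        · rcases eq_or_lt_of_le hia with h | h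
          · exact Or.inl (Or.inr (h ▸ hy))
          · exact Or.inr ⟨i, hi0, by omega, hw, hy⟩
    · have hmf : f a ≤ m := le_of_not_gt h1
      have hstep : (if m < f a then (m, PySem.Set.add vs (e a))
          else if f a < m then (f a, vs) else (m, vs)) = (f a, vs) := by
        rcases eq_or_lt_of_le hmf with h | h
        · rw [if_neg h1, if_neg (by omega), h]
        · rw [if_neg h1, if_pos h]
      have hnoa : ¬ ∃ j, a < j ∧ j < n ∧ f j < f a := by
        rintro ⟨j, hja, hjn, hfj⟩
        have hj := hlb j hja hjn
        omega
      rw [hstep,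
        ih (a - 1) (by omega) (f a) vs (by omega)
          (by intro k hk hkn
              by_cases hka : k = a
              · subst hka; exact le_refl _
              · exact le_trans hmf (hlb k (by omega) hkn))
          ⟨a, by omega, by omega, rfl⟩ y]
      constructor
      · rintro (h | ⟨i, hi0, hia, hw, hy⟩)
        · exact Or.inl h
        · exact Or.inr ⟨i, hi0, by omega, hw, hy⟩
      · rintro (h | ⟨i, hi0, hia, hw, hy⟩)
        · exact Or.inl h
        · rcases eq_or_lt_of_le hia with h | h
          · exact absurd (h ▸ hw) hnoa
          · exact Or.inr ⟨i, hi0, by omega, hw, hy⟩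

-- B's fold also leaves the violator set Nodup
theorem pv_B_fold_nodup (f : Int → Int) (e : Int → String) (l : List Int) :
    ∀ (st : Int × PySem.Set String), st.2.Nodup →
    (l.foldl (fun st i =>
        if st.1 < f i then (st.1, PySem.Set.add st.2 (e i))
        else if f i < st.1 then (f i, st.2)
        else st) st).2.Nodup := by
  induction l with
  | nil => intro st h; simpa using h
  | cons a t ih =>
    intro st h
    simp only [List.foldl_cons]
    apply ih
    split_ifs
    · exact PySem.Set.nodup_add _ _ h
    · exact h
    · exact h

theorem analyze_overtakes_eq (entrance_list exit_list : List String) :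
    analyze_overtakes entrance_list exit_list = analyze_overtakes_alt entrance_list exit_list := by
  unfold analyze_overtakes analyze_overtakes_alt
  set n : Int := (entrance_list.length : Int) with hn
  have hn0 : 0 ≤ n := by simp [hn]
  by_cases h0 : n = 0
  · simp [h0]
  by_cases h1 : n < 2
  · -- n = 1: A's loops produce the empty set
    have hn1 : n = 1 := by omega
    rw [if_neg h0, if_pos h1]
    have hr1 : PySem.List.pyRange 0 n 1 = [0] := by
      rw [hn1, PySem.List.pyRange_one_cons (by norm_num),
        PySem.List.pyRange_one_eq_nil (by norm_num)]
    have hr2 : PySem.List.pyRange (0 + 1) n 1 = [] := by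
      rw [hn1]; exact PySem.List.pyRange_one_eq_nil (by norm_num)
    simp only [hr1, hr2, List.foldl_cons, List.foldl_nil]
    simp [PySem.Set.len, PySem.Set.empty]
  · -- n ≥ 2: same set of violators, hence same size
    rw [if_neg h0, if_neg h1]
    set pos := pvPosDict entrance_list with hpos
    set f : Int → Int := fun i => pos.getD (PySem.List.pyGetD exit_list i "") 0 with hf
    set e : Int → String := fun i => PySem.List.pyGetD exit_list i "" with he
    have hA : ∀ y, y ∈ ((PySem.List.pyRange 0 n 1).foldl (fun vs i =>
        (PySem.List.pyRange (i + 1) n 1).foldl (fun vs j =>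
          if f j < f i then PySem.Set.add vs (e i) else vs) vs) PySem.Set.empty) ↔
        ∃ i, 0 ≤ i ∧ i < n ∧ (∃ j, i < j ∧ j < n ∧ f j < f i) ∧ y = e i := by
      intro y
      rw [pv_mem_foldl_outer (p := fun i j => f j < f i) (e := e)]
      simp only [PySem.List.mem_pyRange_one, PySem.Set.empty, List.not_mem_nil, false_or]
      constructor
      · rintro ⟨i, ⟨hi0, hin⟩, ⟨j, ⟨hj1, hj2⟩, hfj⟩, hy⟩
        exact ⟨i, hi0, hin, ⟨j, by omega, hj2, hfj⟩, hy⟩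
      · rintro ⟨i, hi0, hin, ⟨j, hj1, hj2, hfj⟩, hy⟩
        exact ⟨i, ⟨hi0, hin⟩, ⟨j, ⟨by omega, hj2⟩, hfj⟩, hy⟩
    have hB := pv_B_fold_char n f e (n - 2 + 1).toNat (n - 2) rfl (f (n - 1))
      PySem.Set.empty (by omega)
      (by intro k hk hkn; have : k = n - 1 := by omega
          exact this ▸ le_refl _)
      ⟨n - 1, by omega, by omega, rfl⟩
    have hmem : ∀ y, y ∈ ((PySem.List.pyRange 0 n 1).foldl (fun vs i =>
        (PySem.List.pyRange (i + 1) n 1).foldl (fun vs j =>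
          if f j < f i then PySem.Set.add vs (e i) else vs) vs) PySem.Set.empty) ↔
        y ∈ ((PySem.List.pyRange (n - 2) (-1) (-1)).foldl (fun st i =>
          if st.1 < f i then (st.1, PySem.Set.add st.2 (e i))
          else if f i < st.1 then (f i, st.2)
          else st) (f (n - 1), PySem.Set.empty)).2 := by
      intro y
      rw [hA y, hB y]
      simp only [PySem.Set.empty, List.not_mem_nil, false_or]
      constructor
      · rintro ⟨i, hi0, hin, ⟨j, hj1, hj2, hfj⟩, hy⟩
        exact ⟨i, hi0, by omega, ⟨j, hj1, hj2, hfj⟩, hy⟩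
      · rintro ⟨i, hi0, hin, hw, hy⟩
        exact ⟨i, hi0, by omega, hw, hy⟩
    have hndA : ((PySem.List.pyRange 0 n 1).foldl (fun vs i =>
        (PySem.List.pyRange (i + 1) n 1).foldl (fun vs j =>
          if f j < f i then PySem.Set.add vs (e i) else vs) vs) PySem.Set.empty).Nodup := by
      apply pv_nodup_foldl
      · intro s b hs
        apply pv_nodup_foldl
        · intro s' b' hs'
          split_ifs
          · exact PySem.Set.nodup_add _ _ hs'
          · exact hs'
        · exact hs
      · exact List.nodup_nil
    have hndB := pv_B_fold_nodup f e (PySem.List.pyRange (n - 2) (-1) (-1))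
      (f (n - 1), PySem.Set.empty) List.nodup_nil
    have hperm := (List.perm_ext_iff_of_nodup hndA hndB).mpr hmem
    simp only [PySem.Set.len]
    exact congrArg Int.ofNat hperm.length_eq

-- ===== VERDICT (by name: the statement is the Claim_ definition above) =====
theorem analyze_overtakes_spec : Claim_equal_analyze_overtakes := by
  intro entrance_list exit_list _ _
  exact analyze_overtakes_eq entrance_list exit_list
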